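-- pv_equiv track=rewrite | github.com/ReptilianEye/Matura24Help | zadania2Dane/zadania2_1sol.py | zad4
-- ===== SOURCE A (Python) =====
-- def zad4(dane):
--     longestSeq = 1
--     longestSeqNum = dane[0][0]
--     for col_index in range(len(dane[0])):
--         seq = 1
--         for row_index in range(1, len(dane)):
--             if dane[row_index][col_index] == dane[row_index-1][col_index]:
--                 seq += 1
--             else:
--                 if seq > longestSeq:
--                     longestSeq = seq
--                     longestSeqNum = dane[row_index-1][col_index]
--                 seq = 1
--         if seq > longestSeq:
--             longestSeq = seq
--             longestSeqNum = dane[row_index-1][col_index]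
--     return longestSeq, longestSeqNum
-- ===== SOURCE B (Python) =====
-- def zad4(dane):
--     n, m = len(dane), len(dane[0])
--     # row-major DP: run[c] = length of the current vertical run in column c,
--     # best[c] = (length, value) of the first maximal run seen so far in column c
--     run = [1] * m
--     best = [(0, 0)] * m
--     for r in range(1, n):
--         prev, cur = dane[r - 1], dane[r]
--         best = [best[c] if cur[c] == prev[c] or run[c] <= best[c][0]
--                 else (run[c], prev[c]) for c in range(m)]
--         run = [run[c] + 1 if cur[c] == prev[c] else 1 for c in range(m)]
--     last = dane[n - 1]
--     best = [best[c] if run[c] <= best[c][0] else (run[c], last[c]) for c in range(m)]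
--     res = (1, dane[0][0])
--     for cand in best:
--         if cand[0] > res[0]:
--             res = cand
--     return res
-- ===== Notes on version B (the rewrite author's own statement) =====
-- stated objective: alternative
-- what changed: A scans column by column with a single run counter and a global best updated inline; B sweeps the grid row by row maintaining per-column DP arrays (current run length and best run per column) and combines the per-column bests in a separate final pass.
import Mathlib
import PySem

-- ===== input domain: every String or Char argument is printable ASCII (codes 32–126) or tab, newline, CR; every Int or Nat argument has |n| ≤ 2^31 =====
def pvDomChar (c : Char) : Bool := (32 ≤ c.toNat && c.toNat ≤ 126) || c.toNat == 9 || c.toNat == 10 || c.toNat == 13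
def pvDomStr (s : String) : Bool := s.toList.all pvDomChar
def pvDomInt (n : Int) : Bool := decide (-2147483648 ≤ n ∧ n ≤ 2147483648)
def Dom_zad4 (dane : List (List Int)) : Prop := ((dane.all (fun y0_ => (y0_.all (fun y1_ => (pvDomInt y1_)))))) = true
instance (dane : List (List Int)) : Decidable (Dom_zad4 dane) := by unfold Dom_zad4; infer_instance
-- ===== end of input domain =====

-- B replaces A's column-by-column scan (one run counter, global best updated inline) by a
-- row-by-row DP sweep keeping per-column arrays (current run, best run per column) combined
-- in a final pass (objective: alternative decomposition, same cost); return value only.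

-- dane[r][c]; the IndexError case (none) is excluded by Pre_, the default is never read there
def pvGet (dane : List (List Int)) (r c : Int) : Int :=
  (PySem.List.pyGet? ((PySem.List.pyGet? dane r).getD []) c).getD 0

-- ===== PORT A =====
-- A's inner row loop body: state ((longestSeq, longestSeqNum), seq)
def aStep (dane : List (List Int)) (c : Int) : ((Int × Int) × Int) → Int → ((Int × Int) × Int) :=
  fun p r =>
    if pvGet dane r c = pvGet dane (r-1) c then (p.1, p.2 + 1)
    else ((if p.2 > p.1.1 then (p.2, pvGet dane (r-1) c) else p.1), 1)

def zad4 (dane : List (List Int)) : Int × Int :=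
  let row0 := (PySem.List.pyGet? dane 0).getD []
  let n : Int := (dane.length : Int)
  (PySem.List.pyRange 0 (row0.length : Int) 1).foldl
    (fun st c =>
      let p := (PySem.List.pyRange 1 n 1).foldl (aStep dane c) (st, 1)
      if p.2 > p.1.1 then (p.2, pvGet dane (n - 1 - 1) c) else p.1)
    (1, (PySem.List.pyGet? row0 0).getD 0)

-- ===== PORT B =====
-- one row of B's sweep: rebuild the per-column arrays best (first) and run (second)
def bRowStep (dane : List (List Int)) (cols : List Int) :
    (List (Int × Int) × List Int) → Int → (List (Int × Int) × List Int) :=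
  fun st r =>
    (cols.map (fun c =>
        let b := PySem.List.pyGetD st.1 c ((0 : Int), (0 : Int))
        let rn := PySem.List.pyGetD st.2 c 1
        if pvGet dane r c = pvGet dane (r-1) c ∨ rn ≤ b.1 then b
        else (rn, pvGet dane (r-1) c)),
     cols.map (fun c =>
        let rn := PySem.List.pyGetD st.2 c 1
        if pvGet dane r c = pvGet dane (r-1) c then rn + 1 else 1))

def zad4_alt (dane : List (List Int)) : Int × Int :=
  let n : Int := (dane.length : Int)
  let row0 := (PySem.List.pyGet? dane 0).getD []
  let cols := PySem.List.pyRange 0 (row0.length : Int) 1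
  let p := (PySem.List.pyRange 1 n 1).foldl (bRowStep dane cols)
    (cols.map (fun _ => ((0 : Int), (0 : Int))), cols.map (fun _ => (1 : Int)))
  let best := cols.map (fun c =>
    let b := PySem.List.pyGetD p.1 c ((0 : Int), (0 : Int))
    let rn := PySem.List.pyGetD p.2 c 1
    if rn ≤ b.1 then b else (rn, pvGet dane (n - 1) c))
  best.foldl (fun res cand => if cand.1 > res.1 then cand else res)
    (1, (PySem.List.pyGet? row0 0).getD 0)

-- ===== PRECONDITION & SPEC =====
-- Pre_ excludes exactly the inputs where the Python A raises IndexError: an empty grid, an empty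
-- first row, or a row shorter than the first row (A indexes every row at each column of row 0).
def Pre_zad4 (dane : List (List Int)) : Prop :=
  dane ≠ [] ∧ dane.headD [] ≠ [] ∧ ∀ row ∈ dane, (dane.headD []).length ≤ row.length
instance (dane : List (List Int)) : Decidable (Pre_zad4 dane) := by unfold Pre_zad4; infer_instance

def pvWitness_zad4 : List (List Int) := [[1, 1], [1, 2]]

def Spec_zad4 (dane : List (List Int)) (out : Int × Int) : Prop := out = zad4_alt dane
instance (dane : List (List Int)) (out : Int × Int) : Decidable (Spec_zad4 dane out) := by unfold Spec_zad4; infer_instance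

-- ===== CLAIM (what is proved, stated in full; the proofs are below) =====
def Claim_equal_zad4 : Prop := ∀ (dane : List (List Int)), Dom_zad4 dane → Pre_zad4 dane → Spec_zad4 dane (zad4 dane)

-- ===== LEMMAS AND PROOFS =====

-- B's sweep restricted to one column c: state ((best_len, best_val), run)
def colStep (dane : List (List Int)) (c : Int) : ((Int × Int) × Int) → Int → ((Int × Int) × Int) :=
  fun q r =>
    ((if pvGet dane r c = pvGet dane (r-1) c ∨ q.2 ≤ q.1.1 then q.1
      else (q.2, pvGet dane (r-1) c)),
     (if pvGet dane r c = pvGet dane (r-1) c then q.2 + 1 else 1))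

-- B's row-major fold over the per-column arrays is the map of the per-column folds
theorem fold_pointwise (dane : List (List Int)) (m : Int) (rs : List Int)
    (F : Int → (Int × Int) × Int) :
    rs.foldl (bRowStep dane (PySem.List.pyRange 0 m 1))
      ((PySem.List.pyRange 0 m 1).map (fun c => (F c).1),
       (PySem.List.pyRange 0 m 1).map (fun c => (F c).2))
    = ((PySem.List.pyRange 0 m 1).map (fun c => (rs.foldl (colStep dane c) (F c)).1),
       (PySem.List.pyRange 0 m 1).map (fun c => (rs.foldl (colStep dane c) (F c)).2)) := by
  induction rs generalizing F with
  | nil => rfl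
  | cons r rs ih =>
    simp only [List.foldl_cons]
    have hstep : bRowStep dane (PySem.List.pyRange 0 m 1)
        ((PySem.List.pyRange 0 m 1).map (fun c => (F c).1),
         (PySem.List.pyRange 0 m 1).map (fun c => (F c).2)) r
      = ((PySem.List.pyRange 0 m 1).map (fun c => (colStep dane c (F c) r).1),
         (PySem.List.pyRange 0 m 1).map (fun c => (colStep dane c (F c) r).2)) := by
      unfold bRowStep colStep
      refine Prod.ext ?_ ?_
      · refine List.map_congr_left (fun c hc => ?_)
        have hm := (PySem.List.mem_pyRange_one.mp hc)
        rw [PySem.List.pyGetD_map_pyRange_of_nonneg (fun c => (F c).1) m c (((0:Int),(0:Int))) hm.1 hm.2,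
          PySem.List.pyGetD_map_pyRange_of_nonneg (fun c => (F c).2) m c 1 hm.1 hm.2]
      · refine List.map_congr_left (fun c hc => ?_)
        have hm := (PySem.List.mem_pyRange_one.mp hc)
        rw [PySem.List.pyGetD_map_pyRange_of_nonneg (fun c => (F c).2) m c 1 hm.1 hm.2]
    rw [hstep, ih (fun c => colStep dane c (F c) r)]

-- the invariant tying A's (global best, seq) to B's per-column (local best, run):
-- seq = run, global = local-best-if-it-beats-st, run ≥ 1, local len ≥ 0, and a run ≥ 2 means
-- the last two visited rows of column c are equal
theorem col_inv (dane : List (List Int)) (c : Int) (st : Int × Int) (h : 1 ≤ st.1) (k : Nat) :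
    (((PySem.List.pyRange 1 (k : Int) 1).foldl (aStep dane c) (st, 1)).2
        = ((PySem.List.pyRange 1 (k : Int) 1).foldl (colStep dane c) ((((0:Int),(0:Int)), (1:Int)))).2)
    ∧ (((PySem.List.pyRange 1 (k : Int) 1).foldl (aStep dane c) (st, 1)).1
        = (if ((PySem.List.pyRange 1 (k : Int) 1).foldl (colStep dane c) ((((0:Int),(0:Int)), (1:Int)))).1.1 > st.1
           then ((PySem.List.pyRange 1 (k : Int) 1).foldl (colStep dane c) ((((0:Int),(0:Int)), (1:Int)))).1 else st))
    ∧ 1 ≤ ((PySem.List.pyRange 1 (k : Int) 1).foldl (colStep dane c) ((((0:Int),(0:Int)), (1:Int)))).2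
    ∧ 0 ≤ ((PySem.List.pyRange 1 (k : Int) 1).foldl (colStep dane c) ((((0:Int),(0:Int)), (1:Int)))).1.1
    ∧ (2 ≤ ((PySem.List.pyRange 1 (k : Int) 1).foldl (colStep dane c) ((((0:Int),(0:Int)), (1:Int)))).2
        → pvGet dane ((k : Int) - 1) c = pvGet dane ((k : Int) - 2) c) := by
  induction k with
  | zero =>
    rw [PySem.List.pyRange_one_eq_nil (by norm_num)]
    refine ⟨rfl, ?_, le_rfl, le_rfl, fun hh => absurd (show (2:Int) ≤ 1 from hh) (by omega)⟩
    show st = if (0:Int) > st.1 then ((0:Int), (0:Int)) else st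
    exact (if_neg (by omega : ¬ (0:Int) > st.1)).symm
  | succ k ih =>
    by_cases hk : 1 ≤ k
    · have hcast : (((k + 1 : Nat)) : Int) = (k : Int) + 1 := by push_cast; ring
      rw [hcast, PySem.List.pyRange_one_succ_right (by exact_mod_cast hk), List.foldl_append,
        List.foldl_append]
      obtain ⟨h1, h2, h3, h4, h5⟩ := ih
      set pA := (PySem.List.pyRange 1 (k : Int) 1).foldl (aStep dane c) (st, 1) with hpA
      set pB := (PySem.List.pyRange 1 (k : Int) 1).foldl (colStep dane c)
          ((((0:Int),(0:Int)), (1:Int))) with hpB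
      simp only [List.foldl_cons, List.foldl_nil]
      have hA1ge : st.1 ≤ pA.1.1 := by
        rw [h2]; split_ifs with hL
        · omega
        · exact le_rfl
      have hB1le : pB.1.1 ≤ pA.1.1 := by
        rw [h2]; split_ifs with hL
        · exact le_rfl
        · omega
      by_cases heq : pvGet dane (k : Int) c = pvGet dane ((k : Int) - 1) c
      · have e1 : aStep dane c pA (k : Int) = (pA.1, pA.2 + 1) := by
          simp only [aStep]; rw [if_pos heq]
        have e2 : colStep dane c pB (k : Int) = (pB.1, pB.2 + 1) := by
          simp only [colStep]; rw [if_pos (Or.inl heq), if_pos heq]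
        rw [e1, e2]
        refine ⟨show pA.2 + 1 = pB.2 + 1 by omega, h2,
          show (1:Int) ≤ pB.2 + 1 by omega, h4, fun _ => ?_⟩
        rw [show (k : Int) + 1 - 1 = (k : Int) from by ring,
          show (k : Int) + 1 - 2 = (k : Int) - 1 from by ring]
        exact heq
      · have e1 : aStep dane c pA (k : Int)
            = ((if pA.2 > pA.1.1 then (pA.2, pvGet dane ((k : Int) - 1) c) else pA.1), 1) := by
          simp only [aStep]; rw [if_neg heq]
        by_cases hbl : pB.2 ≤ pB.1.1
        · have e2 : colStep dane c pB (k : Int) = (pB.1, 1) := by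
            simp only [colStep]; rw [if_pos (Or.inr hbl), if_neg heq]
          rw [e1, e2]
          have hA : ¬ pA.2 > pA.1.1 := by omega
          refine ⟨rfl, ?_, le_rfl, h4,
            fun hh => absurd (show (2:Int) ≤ 1 from hh) (by omega)⟩
          show (if pA.2 > pA.1.1 then (pA.2, pvGet dane ((k : Int) - 1) c) else pA.1)
            = if pB.1.1 > st.1 then pB.1 else st
          rw [if_neg hA]
          exact h2
        · have e2 : colStep dane c pB (k : Int)
              = ((pB.2, pvGet dane ((k : Int) - 1) c), 1) := by
            simp only [colStep]; rw [if_neg (not_or.mpr ⟨heq, hbl⟩), if_neg heq]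
          rw [e1, e2]
          refine ⟨rfl, ?_, le_rfl, show (0:Int) ≤ pB.2 by omega,
            fun hh => absurd (show (2:Int) ≤ 1 from hh) (by omega)⟩
          show (if pA.2 > pA.1.1 then (pA.2, pvGet dane ((k : Int) - 1) c) else pA.1)
            = if pB.2 > st.1 then (pB.2, pvGet dane ((k : Int) - 1) c) else st
          by_cases hA : pA.2 > pA.1.1
          · rw [if_pos hA, if_pos (show pB.2 > st.1 by omega), h1]
          · rw [if_neg hA]
            have hL : ¬ pB.1.1 > st.1 := by
              intro hgt
              have hfst : pA.1.1 = pB.1.1 := by rw [h2, if_pos hgt]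
              omega
            have hst1 : pA.1.1 = st.1 := by rw [h2, if_neg hL]
            rw [if_neg (show ¬ pB.2 > st.1 by omega), h2, if_neg hL]
    · have hk0 : k = 0 := by omega
      subst hk0
      rw [show (((0 + 1 : Nat)) : Int) = 1 from rfl, PySem.List.pyRange_one_eq_nil le_rfl]
      refine ⟨rfl, ?_, le_rfl, le_rfl, fun hh => absurd (show (2:Int) ≤ 1 from hh) (by omega)⟩
      show st = if (0:Int) > st.1 then ((0:Int), (0:Int)) else st
      exact (if_neg (by omega : ¬ (0:Int) > st.1)).symm

-- A's inner loop / B's per-column fold / B's per-column candidate, as named terms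
def aFold (dane : List (List Int)) (c : Int) (st : Int × Int) : (Int × Int) × Int :=
  (PySem.List.pyRange 1 (dane.length : Int) 1).foldl (aStep dane c) (st, 1)

def colFold (dane : List (List Int)) (c : Int) : (Int × Int) × Int :=
  (PySem.List.pyRange 1 (dane.length : Int) 1).foldl (colStep dane c) ((((0:Int),(0:Int)), (1:Int)))

def candB (dane : List (List Int)) (c : Int) : Int × Int :=
  if (colFold dane c).2 ≤ (colFold dane c).1.1 then (colFold dane c).1
  else ((colFold dane c).2, pvGet dane ((dane.length : Int) - 1) c)

def combB (res cand : Int × Int) : Int × Int := if cand.1 > res.1 then cand else res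

-- flushing both sides: A's per-column body equals the strict combine with B's per-column candidate
theorem col_body_eq (dane : List (List Int)) (c : Int) (st : Int × Int) (h : 1 ≤ st.1) :
    (if (aFold dane c st).2 > (aFold dane c st).1.1
     then ((aFold dane c st).2, pvGet dane ((dane.length : Int) - 1 - 1) c)
     else (aFold dane c st).1)
    = combB st (candB dane c) := by
  obtain ⟨h1, h2, h3, h4, h5⟩ := col_inv dane c st h dane.length
  unfold aFold candB combB colFold
  set pA := (PySem.List.pyRange 1 (dane.length : Int) 1).foldl (aStep dane c) (st, 1) with hpA
  set pB := (PySem.List.pyRange 1 (dane.length : Int) 1).foldl (colStep dane c)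
      ((((0:Int),(0:Int)), (1:Int))) with hpB
  have hA1ge : st.1 ≤ pA.1.1 := by
    rw [h2]; split_ifs with hL
    · omega
    · exact le_rfl
  have hB1le : pB.1.1 ≤ pA.1.1 := by
    rw [h2]; split_ifs with hL
    · exact le_rfl
    · omega
  by_cases hA : pA.2 > pA.1.1
  · have hlast : pvGet dane ((dane.length : Int) - 1) c = pvGet dane ((dane.length : Int) - 2) c :=
      h5 (by omega)
    rw [if_pos hA, if_neg (show ¬ pB.2 ≤ pB.1.1 by omega)]
    rw [if_pos (show (pB.2, pvGet dane ((dane.length : Int) - 1) c).1 > st.1 from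
      show pB.2 > st.1 by omega)]
    rw [h1, hlast, show (dane.length : Int) - 1 - 1 = (dane.length : Int) - 2 from by ring]
  · rw [if_neg hA]
    by_cases hbl : pB.2 ≤ pB.1.1
    · rw [if_pos hbl]
      exact h2
    · rw [if_neg hbl]
      have hL : ¬ pB.1.1 > st.1 := by
        intro hgt
        have hfst : pA.1.1 = pB.1.1 := by rw [h2, if_pos hgt]
        omega
      have hst1 : pA.1.1 = st.1 := by rw [h2, if_neg hL]
      rw [if_neg (show ¬ (pB.2, pvGet dane ((dane.length : Int) - 1) c).1 > st.1 from
        show ¬ pB.2 > st.1 by omega), h2, if_neg hL]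

-- foldl with two functions that agree on an invariant-preserving set of states
theorem foldl_inv {α σ : Type} (P : σ → Prop) (f g : σ → α → σ) (l : List α) (s : σ)
    (hP : P s) (hfg : ∀ t x, P t → f t x = g t x) (hg : ∀ t x, P t → P (g t x)) :
    l.foldl f s = l.foldl g s := by
  induction l generalizing s with
  | nil => rfl
  | cons x xs ih => simp only [List.foldl_cons]; rw [hfg s x hP]; exact ih _ (hg s x hP)

-- B's fold with the literal zero/one initial arrays, concluded in terms of colFold
theorem fold_pointwise0 (dane : List (List Int)) (m : Int) :
    (PySem.List.pyRange 1 (dane.length : Int) 1).foldl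
      (bRowStep dane (PySem.List.pyRange 0 m 1))
      ((PySem.List.pyRange 0 m 1).map (fun _ => ((0 : Int), (0 : Int))),
       (PySem.List.pyRange 0 m 1).map (fun _ => (1 : Int)))
    = ((PySem.List.pyRange 0 m 1).map (fun c => (colFold dane c).1),
       (PySem.List.pyRange 0 m 1).map (fun c => (colFold dane c).2)) :=
  fold_pointwise dane m (PySem.List.pyRange 1 (dane.length : Int) 1)
    (fun _ => ((((0:Int),(0:Int)), (1:Int))))

theorem main_eq (dane : List (List Int)) : zad4 dane = zad4_alt dane := by
  have hm0 : (0:Int) ≤ ((((PySem.List.pyGet? dane 0).getD []).length : Int)) := by positivity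
  set m : Int := ((((PySem.List.pyGet? dane 0).getD []).length : Int)) with hm
  set cols := PySem.List.pyRange 0 m 1 with hcols
  set init : Int × Int := (1, (PySem.List.pyGet? ((PySem.List.pyGet? dane 0).getD []) 0).getD 0)
    with hinit
  have hB : zad4_alt dane = (cols.map (candB dane)).foldl combB init := by
    have h1 : zad4_alt dane
        = (cols.map (fun c =>
            let b := PySem.List.pyGetD ((cols.map (fun c => (colFold dane c).1),
                cols.map (fun c => (colFold dane c).2)).1) c ((0 : Int), (0 : Int))
            let rn := PySem.List.pyGetD ((cols.map (fun c => (colFold dane c).1),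
                cols.map (fun c => (colFold dane c).2)).2) c 1
            if rn ≤ b.1 then b
            else (rn, pvGet dane ((dane.length : Int) - 1) c))).foldl combB init :=
      congrArg (fun (p : List (Int × Int) × List Int) =>
        (cols.map (fun c =>
            let b := PySem.List.pyGetD p.1 c ((0 : Int), (0 : Int))
            let rn := PySem.List.pyGetD p.2 c 1
            if rn ≤ b.1 then b
            else (rn, pvGet dane ((dane.length : Int) - 1) c))).foldl combB init)
        (fold_pointwise0 dane m)
    rw [h1]
    refine congrArg (fun l => l.foldl combB init) (List.map_congr_left (fun c hc => ?_))
    have hmm := PySem.List.mem_pyRange_one.mp hc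
    show (let b := PySem.List.pyGetD (cols.map (fun c => (colFold dane c).1)) c ((0 : Int), (0 : Int))
          let rn := PySem.List.pyGetD (cols.map (fun c => (colFold dane c).2)) c 1
          if rn ≤ b.1 then b else (rn, pvGet dane ((dane.length : Int) - 1) c)) = candB dane c
    rw [hcols, PySem.List.pyGetD_map_pyRange_of_nonneg (fun c => (colFold dane c).1) m c
        (((0:Int),(0:Int))) hmm.1 hmm.2,
      PySem.List.pyGetD_map_pyRange_of_nonneg (fun c => (colFold dane c).2) m c 1 hmm.1 hmm.2]
    rfl
  have hA : zad4 dane = cols.foldl (fun res c => combB res (candB dane c)) init := by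
    refine foldl_inv (fun st => 1 ≤ st.1) _ _ _ _ le_rfl ?_ ?_
    · intro t c hP
      exact col_body_eq dane c t hP
    · intro t c hP
      unfold combB
      split_ifs with hcnd
      · omega
      · exact hP
  rw [hA, hB, List.foldl_map]

-- ===== VERDICT (by name: the statement is the Claim_ definition above) =====
theorem zad4_spec : Claim_equal_zad4 := by
  intro dane _ _
  unfold Spec_zad4
  exact main_eq dane
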